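-- pv_equiv track=rewrite | github.com/naudotojovardas/New | pep8_4.py | is_magic_number
-- ===== SOURCE A (Python) =====
-- def is_magic_number(n):
--
--     def sum_of_digits(num):
--         total = 0
--         while num > 0:
--             total += num % 10
--             num //= 10
--         return total
--
--     while n >= 10:
--         n = sum_of_digits(n)
--
--     return n == 1
-- ===== SOURCE B (Python) =====
-- def is_magic_number(n):
--     return n > 0 and n % 9 == 1
-- ===== Notes on version B (the rewrite author's own statement) =====
-- stated objective: simpler
-- what changed: Replaces the iterative repeated digit-sum loops with the closed-form digital-root test: a positivity check plus a single modulus by nine.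
import Mathlib
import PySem

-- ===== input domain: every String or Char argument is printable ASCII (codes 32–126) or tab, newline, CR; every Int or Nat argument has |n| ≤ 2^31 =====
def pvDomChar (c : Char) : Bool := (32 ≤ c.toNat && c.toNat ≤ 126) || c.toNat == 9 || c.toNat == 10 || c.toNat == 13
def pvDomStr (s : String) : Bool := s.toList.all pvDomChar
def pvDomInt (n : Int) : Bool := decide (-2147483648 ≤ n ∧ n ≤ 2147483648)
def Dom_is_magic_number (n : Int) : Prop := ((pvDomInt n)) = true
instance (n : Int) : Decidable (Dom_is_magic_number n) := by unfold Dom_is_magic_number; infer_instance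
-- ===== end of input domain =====

-- B replaces A's repeated digit-sum loop by the digital-root closed form n > 0 && n % 9 == 1.

-- ===== PORT A =====
-- inner loop 'while num > 0: total += num % 10; num //= 10'
-- (fuel = num.toNat is a termination device only: num.toNat strictly drops each iteration, so it never runs out)
def pvSodGo (fuel : Nat) (total num : Int) : Int :=
  match fuel with
  | 0 => total
  | f + 1 =>
    if 0 < num then pvSodGo f (total + PySem.Int.mod num 10) (PySem.Int.floordiv num 10)
    else total

def pvSumOfDigits (num : Int) : Int := pvSodGo num.toNat 0 num

-- outer loop 'while n >= 10: n = sum_of_digits(n)' (fuel = n.toNat, sufficient since the digit sum strictly decreases)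
def pvMagicGo (fuel : Nat) (n : Int) : Int :=
  match fuel with
  | 0 => n
  | f + 1 => if 10 ≤ n then pvMagicGo f (pvSumOfDigits n) else n

def is_magic_number (n : Int) : Bool := pvMagicGo n.toNat n == 1

-- ===== PORT B =====
def is_magic_number_alt (n : Int) : Bool :=
  decide (0 < n) && (PySem.Int.mod n 9 == 1)

-- ===== PRECONDITION & SPEC =====
def Spec_is_magic_number (n : Int) (out : Bool) : Prop := out = is_magic_number_alt n
instance (n : Int) (out : Bool) : Decidable (Spec_is_magic_number n out) := by unfold Spec_is_magic_number; infer_instance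

-- ===== CLAIM (what is proved, stated in full; the proofs are below) =====
def Claim_equal_is_magic_number : Prop := ∀ (n : Int), Dom_is_magic_number n → Spec_is_magic_number n (is_magic_number n)

-- ===== LEMMAS AND PROOFS =====

-- for sufficient fuel, the inner loop's result: bounds and value mod 9
theorem pvSodGo_spec (fuel : Nat) (total num : Int) (hf : num.toNat ≤ fuel) (h0 : 0 ≤ num) :
    total ≤ pvSodGo fuel total num ∧ pvSodGo fuel total num ≤ total + num ∧
    (0 < num → total + 1 ≤ pvSodGo fuel total num) ∧
    pvSodGo fuel total num % 9 = (total + num) % 9 := by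
  induction fuel generalizing total num with
  | zero =>
    have : num = 0 := by omega
    simp [pvSodGo, this]
  | succ f ih =>
    rw [pvSodGo]
    by_cases hpos : 0 < num
    · rw [if_pos hpos]
      have hm : PySem.Int.mod num 10 = num % 10 := PySem.Int.mod_eq_emod_of_pos (by omega)
      have hd : PySem.Int.floordiv num 10 = num / 10 := PySem.Int.floordiv_eq_ediv_of_pos (by omega)
      rw [hm, hd]
      have hq1 : 0 ≤ num / 10 := by omega
      have hq2 : (num / 10).toNat ≤ f := by omega
      have ⟨i1, i2, i3, i4⟩ := ih (total + num % 10) (num / 10) hq2 hq1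
      refine ⟨by omega, by omega, fun _ => ?_, by omega⟩
      by_cases hq : 0 < num / 10
      · have := i3 hq; omega
      · omega
    · rw [if_neg hpos]
      have : num = 0 := by omega
      simp [this]

theorem pvSumOfDigits_spec (n : Int) (h : 10 ≤ n) :
    1 ≤ pvSumOfDigits n ∧ pvSumOfDigits n < n ∧ pvSumOfDigits n % 9 = n % 9 := by
  unfold pvSumOfDigits
  have hn : n.toNat = (n.toNat - 1) + 1 := by omega
  rw [hn, pvSodGo, if_pos (by omega : (0:Int) < n)]
  have hm : PySem.Int.mod n 10 = n % 10 := PySem.Int.mod_eq_emod_of_pos (by omega)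
  have hd : PySem.Int.floordiv n 10 = n / 10 := PySem.Int.floordiv_eq_ediv_of_pos (by omega)
  rw [hm, hd]
  have ⟨i1, i2, i3, i4⟩ := pvSodGo_spec (n.toNat - 1) (0 + n % 10) (n / 10) (by omega) (by omega)
  refine ⟨?_, by omega, by omega⟩
  by_cases hq : 0 < n / 10
  · have := i3 hq; omega
  · omega

-- outer loop: for sufficient fuel, the result is the digital root (in [1,9], ≡ n mod 9) when n ≥ 10, n itself otherwise
theorem pvMagicGo_spec (fuel : Nat) (n : Int) (hf : n.toNat ≤ fuel) :
    (10 ≤ n → 1 ≤ pvMagicGo fuel n ∧ pvMagicGo fuel n ≤ 9 ∧ pvMagicGo fuel n % 9 = n % 9) ∧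
    (n < 10 → pvMagicGo fuel n = n) := by
  induction fuel generalizing n with
  | zero => exact ⟨fun h => absurd h (by omega), fun _ => by simp [pvMagicGo]⟩
  | succ f ih =>
    rw [pvMagicGo]
    by_cases hge : 10 ≤ n
    · rw [if_pos hge]
      refine ⟨fun _ => ?_, fun h => absurd h (by omega)⟩
      have ⟨h1, h2, h3⟩ := pvSumOfDigits_spec n hge
      have hfs : (pvSumOfDigits n).toNat ≤ f := by omega
      have ihs := ih (pvSumOfDigits n) hfs
      by_cases hs : 10 ≤ pvSumOfDigits n
      · have ⟨j1, j2, j3⟩ := ihs.1 hs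
        exact ⟨j1, j2, by omega⟩
      · have := ihs.2 (by omega)
        exact ⟨by omega, by omega, by omega⟩
    · rw [if_neg hge]
      exact ⟨fun h => absurd h hge, fun _ => rfl⟩

-- ===== VERDICT (by name: the statement is the Claim_ definition above) =====
theorem is_magic_number_spec : Claim_equal_is_magic_number := by
  intro n _
  unfold Spec_is_magic_number is_magic_number is_magic_number_alt
  have hm : PySem.Int.mod n 9 = n % 9 := PySem.Int.mod_eq_emod_of_pos (by omega)
  rw [hm]
  have h := pvMagicGo_spec n.toNat n (le_refl _)
  have hn9 : 0 ≤ n % 9 ∧ n % 9 < 9 := ⟨Int.emod_nonneg n (by omega), Int.emod_lt_of_pos n (by omega)⟩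
  by_cases hge : 10 ≤ n
  · have ⟨h1, h2, h3⟩ := h.1 hge
    rw [Bool.eq_iff_iff]
    simp only [beq_iff_eq, Bool.and_eq_true, decide_eq_true_eq]
    omega
  · have heq := h.2 (by omega)
    rw [heq, Bool.eq_iff_iff]
    simp only [beq_iff_eq, Bool.and_eq_true, decide_eq_true_eq]
    omega
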